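-- pv_equiv track=rewrite | github.com/Cristioro/RepetiScan | RepetiScan.py | find_similar_groups_by_words
-- ===== SOURCE A (Python) =====
-- def clean_title(title, blacklist):
--     lowered = title.lower()
--     for word, active in blacklist.items():
--         if active and word in lowered:
--             lowered = lowered.replace(word, '')
--     return lowered.strip()
--
-- def find_similar_groups_by_words(songs, min_overlap, blacklist):
--     groups = []
--     seen = set()
--     for i in range(len(songs)):
--         title_i, file_i, artist_i = songs[i]
--         if file_i in seen:
--             continue
--         group = [(title_i, file_i, artist_i)]
--         words_i = set(clean_title(title_i, blacklist).split())
--         seen.add(file_i)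
--         for j in range(i+1, len(songs)):
--             title_j, file_j, artist_j = songs[j]
--             if file_j in seen:
--                 continue
--             words_j = set(clean_title(title_j, blacklist).split())
--             if len(words_i & words_j) >= min_overlap:
--                 group.append((title_j, file_j, artist_j))
--                 seen.add(file_j)
--         if len(group) > 1:
--             groups.append(group)
--     return groups
-- ===== SOURCE B (Python) =====
-- from collections import Counter
--
--
-- def clean_title(title, blacklist):
--     lowered = title.lower()
--     for word, active in blacklist.items():
--         if active and word in lowered:
--             lowered = lowered.replace(word, '')
--     return lowered.strip()
--
--
-- def find_similar_groups_by_words(songs, min_overlap, blacklist):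
--     # Clean every title once; build an inverted word -> song-index list, then for
--     # each head count shared words of later songs via the index instead of
--     # re-cleaning and intersecting every later title.
--     word_sets = [set(clean_title(t, blacklist).split()) for t, _, _ in songs]
--     index = {}
--     for j, ws in enumerate(word_sets):
--         for w in ws:
--             index.setdefault(w, []).append(j)
--     groups = []
--     seen = set()
--     for i, (song, ws_i) in enumerate(zip(songs, word_sets)):
--         if song[1] in seen:
--             continue
--         seen.add(song[1])
--         if min_overlap <= 0:
--             cands = range(i + 1, len(songs))
--         else:
--             merged = [j for w in ws_i for j in index[w] if j > i]
--             cands = sorted(j for j, c in Counter(merged).items() if c >= min_overlap)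
--         group = [song]
--         for j in cands:
--             s = songs[j]
--             if s[1] not in seen:
--                 group.append(s)
--                 seen.add(s[1])
--         if len(group) > 1:
--             groups.append(group)
--     return groups
-- ===== Notes on version B (the rewrite author's own statement) =====
-- stated objective: faster
-- what changed: B cleans every title exactly once, builds an inverted word-to-song-index map, and for each group head obtains the qualifying later songs by counting index postings with a Counter and sorting the qualifying indices, instead of A's nested index loops that re-clean, re-split and intersect every later title for every head.
import Mathlib
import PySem

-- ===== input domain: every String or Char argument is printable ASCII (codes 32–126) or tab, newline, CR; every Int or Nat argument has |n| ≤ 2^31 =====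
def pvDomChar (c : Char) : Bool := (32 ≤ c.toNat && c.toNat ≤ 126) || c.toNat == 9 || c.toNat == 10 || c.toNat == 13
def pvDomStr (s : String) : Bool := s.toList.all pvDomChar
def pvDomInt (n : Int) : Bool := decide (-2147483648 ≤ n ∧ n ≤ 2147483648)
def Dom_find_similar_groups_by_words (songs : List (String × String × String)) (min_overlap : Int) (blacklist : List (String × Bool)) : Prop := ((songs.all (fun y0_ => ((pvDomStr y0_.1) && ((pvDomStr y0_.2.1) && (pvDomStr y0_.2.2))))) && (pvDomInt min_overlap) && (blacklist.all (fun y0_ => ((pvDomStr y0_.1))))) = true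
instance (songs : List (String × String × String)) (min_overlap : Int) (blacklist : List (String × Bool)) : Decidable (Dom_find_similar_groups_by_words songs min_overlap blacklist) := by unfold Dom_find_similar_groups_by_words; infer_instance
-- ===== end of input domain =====

-- B replaces A's nested re-clean-and-intersect scan by one cleaning pass, an inverted
-- word→song-index map and per-head candidate counting (objective: faster).

-- ===== PORT A =====
-- shared module helper clean_title (textually identical in Source A and Source B);
-- the Python parameter is a dict, modelled as PySem.Dict built from the assoc list
def clean_title (title : String) (blacklist : List (String × Bool)) : String :=
  let d := PySem.Dict.ofList blacklist
  let lowered :=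
    d.items.foldl
      (fun low p =>
        if p.2 && PySem.Str.isIn p.1 low then PySem.Str.replace low p.1 "" else low)
      (PySem.Str.lower title)
  PySem.Str.strip lowered

-- set(clean_title(t, blacklist).split()) — the same expression occurs in Source A and Source B
def wordSet (blacklist : List (String × Bool)) (t : String) : PySem.Set String :=
  PySem.Set.ofList (PySem.Str.split₀ (clean_title t blacklist))

-- len(w1 & w2) >= min_overlap (A's inner test)
def hasOverlap (m : Int) (w1 w2 : PySem.Set String) : Bool :=
  decide (m ≤ ((PySem.Set.inter w1 w2).length : Int))

-- A's inner 'for j in range(i+1, len(songs))' loop: the scanned j's are exactly the suffix after i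
def innerA (m : Int) (bl : List (String × Bool)) (wi : PySem.Set String)
    (rest : List (String × String × String))
    (st : List (String × String × String) × PySem.Set String) :
    List (String × String × String) × PySem.Set String :=
  rest.foldl
    (fun st sj =>
      if PySem.Set.contains st.2 sj.2.1 then st
      else
        let wj := wordSet bl sj.1
        if hasOverlap m wi wj then (st.1 ++ [sj], PySem.Set.add st.2 sj.2.1) else st)
    st

-- A's outer 'for i in range(len(songs))' loop, songs[i] being the head of the suffix at i
def auxA (m : Int) (bl : List (String × Bool)) :
    List (String × String × String) → PySem.Set String →
    List (List (String × String × String)) → List (List (String × String × String))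
  | [], _, gs => gs
  | s :: rest, seen, gs =>
    if PySem.Set.contains seen s.2.1 then auxA m bl rest seen gs
    else
      let wi := wordSet bl s.1
      let st := innerA m bl wi rest ([s], PySem.Set.add seen s.2.1)
      auxA m bl rest st.2 (if 1 < st.1.length then gs ++ [st.1] else gs)

def find_similar_groups_by_words (songs : List (String × String × String)) (min_overlap : Int) (blacklist : List (String × Bool)) : List (List (String × String × String)) :=
  auxA min_overlap blacklist songs PySem.Set.empty []

-- ===== PORT B =====
-- B's inverted index: 'for j, ws in enumerate(word_sets): for w in ws: index.setdefault(w, []).append(j)'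
-- (setdefault+append = insert the list extended by one element)
def bIndex (wss : List (PySem.Set String)) : PySem.Dict String (List Int) :=
  (PySem.List.enumerate wss 0).foldl
    (fun d p => p.2.foldl (fun d w => d.insert w (d.getD w [] ++ [p.1])) d)
    PySem.Dict.empty

-- B's candidate computation for one head: range when min_overlap <= 0, else the sorted
-- qualifying keys of Counter(merged).  'index[w]' never misses (w comes from word_sets),
-- so the lookup is ported as getD with default [].
def bCands (m : Int) (idx : PySem.Dict String (List Int)) (wsi : PySem.Set String)
    (i n : Int) : List Int :=
  if m ≤ 0 then PySem.List.pyRange (i + 1) n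
  else
    let merged := wsi.flatMap (fun w => (idx.getD w []).filter (fun j => decide (i < j)))
    PySem.List.sorted
      (((PySem.Dict.counter merged).items.filter (fun q => decide (m ≤ q.2))).map (·.1))
      (fun x => x)

-- B's 'for j in cands: s = songs[j]; if s[1] not in seen: …' loop
-- (songs[j] is ported as pyGet? with a dummy default: every j in cands is in range)
def bCollect (songs : List (String × String × String)) (cands : List Int)
    (st : List (String × String × String) × PySem.Set String) :
    List (String × String × String) × PySem.Set String :=
  cands.foldl
    (fun st j =>
      let s := (PySem.List.pyGet? songs j).getD ("", "", "")
      if !PySem.Set.contains st.2 s.2.1 then (st.1 ++ [s], PySem.Set.add st.2 s.2.1)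
      else st)
    st

-- 'if len(group) > 1: groups.append(group)' plus carrying the seen-set forward
def bPush (gs : List (List (String × String × String)))
    (st : List (String × String × String) × PySem.Set String) :
    List (List (String × String × String)) × PySem.Set String :=
  (if 1 < st.1.length then gs ++ [st.1] else gs, st.2)

-- the body of B's 'for i, (song, ws_i) in enumerate(zip(songs, word_sets))' loop
def bStep (m : Int) (songs : List (String × String × String))
    (idx : PySem.Dict String (List Int))
    (acc : List (List (String × String × String)) × PySem.Set String)
    (p : Int × ((String × String × String) × PySem.Set String)) :
    List (List (String × String × String)) × PySem.Set String :=
  if PySem.Set.contains acc.2 p.2.1.2.1 then acc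
  else
    bPush acc.1 (bCollect songs
      (bCands m idx p.2.2 p.1 (songs.length : Int))
      ([p.2.1], PySem.Set.add acc.2 p.2.1.2.1))

def find_similar_groups_by_words_alt (songs : List (String × String × String)) (min_overlap : Int) (blacklist : List (String × Bool)) : List (List (String × String × String)) :=
  let wss := songs.map (fun s => wordSet blacklist s.1)
  ((PySem.List.enumerate (songs.zip wss) 0).foldl
    (bStep min_overlap songs (bIndex wss)) ([], PySem.Set.empty)).1


-- ===== PRECONDITION & SPEC =====
def Spec_find_similar_groups_by_words (songs : List (String × String × String)) (min_overlap : Int) (blacklist : List (String × Bool)) (out : List (List (String × String × String))) : Prop := out = find_similar_groups_by_words_alt songs min_overlap blacklist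
instance (songs : List (String × String × String)) (min_overlap : Int) (blacklist : List (String × Bool)) (out : List (List (String × String × String))) : Decidable (Spec_find_similar_groups_by_words songs min_overlap blacklist out) := by unfold Spec_find_similar_groups_by_words; infer_instance

-- ===== CLAIM (what is proved, stated in full; the proofs are below) =====
def Claim_equal_find_similar_groups_by_words : Prop := ∀ (songs : List (String × String × String)) (min_overlap : Int) (blacklist : List (String × Bool)), Dom_find_similar_groups_by_words songs min_overlap blacklist → Spec_find_similar_groups_by_words songs min_overlap blacklist (find_similar_groups_by_words songs min_overlap blacklist)

-- ===== LEMMAS AND PROOFS =====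

theorem bIndex_inner (ws : List String) (hnd : ws.Nodup) (d : PySem.Dict String (List Int))
    (i : Int) (w : String) :
    (ws.foldl (fun d w => d.insert w (d.getD w [] ++ [i])) d).getD w []
      = d.getD w [] ++ (if w ∈ ws then [i] else []) := by
  induction ws generalizing d with
  | nil => simp
  | cons a t ih =>
    simp only [List.foldl_cons]
    rw [ih (by simpa using hnd.of_cons)]
    by_cases hw : w = a
    · subst hw
      have hnt : w ∉ t := by simpa using (List.nodup_cons.mp hnd).1
      simp [hnt, PySem.Dict.getD_insert_self]
    · rw [PySem.Dict.getD_insert_of_ne _ _ _ hw]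
      simp [hw, List.mem_cons]

theorem bIndex_getD (wss : List (PySem.Set String)) (hnd : ∀ ws ∈ wss, ws.Nodup) (w : String) :
    (bIndex wss).getD w []
      = ((PySem.List.enumerate wss 0).filter (fun p => p.2.contains w)).map (·.1) := by
  suffices h : ∀ (l : List (PySem.Set String)) (s : Int) (d : PySem.Dict String (List Int)),
      (∀ ws ∈ l, ws.Nodup) →
      ((PySem.List.enumerate l s).foldl
        (fun d p => p.2.foldl (fun d w => d.insert w (d.getD w [] ++ [p.1])) d) d).getD w []
        = d.getD w [] ++ ((PySem.List.enumerate l s).filter (fun p => p.2.contains w)).map (·.1) by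
    simpa [bIndex] using h wss 0 PySem.Dict.empty hnd
  intro l
  induction l with
  | nil => simp
  | cons ws t ih =>
    intro s d hl
    rw [PySem.List.enumerate_cons]
    simp only [List.foldl_cons, List.filter_cons]
    rw [ih (s+1) _ (fun x hx => hl x (List.mem_cons_of_mem _ hx))]
    rw [bIndex_inner ws (hl ws List.mem_cons_self) d s w]
    by_cases hw : w ∈ ws
    · simp [hw, PySem.Set.contains]
    · simp [hw, PySem.Set.contains]
theorem mem_bIndex (wss : List (PySem.Set String)) (hnd : ∀ ws ∈ wss, ws.Nodup)
    (w : String) (j : Int) :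
    j ∈ (bIndex wss).getD w []
      ↔ ∃ (k : Nat) (hlt : k < wss.length), j = (k : Int) ∧ w ∈ wss[k] := by
  rw [bIndex_getD wss hnd w]
  simp only [List.mem_map, List.mem_filter]
  constructor
  · rintro ⟨p, ⟨hp, hc⟩, rfl⟩
    obtain ⟨k, hk, rfl⟩ := (PySem.List.mem_enumerate_iff _ _ _).mp hp
    exact ⟨k, hk, by simp, by
      simpa [PySem.Set.contains] using hc⟩
  · rintro ⟨k, hk, rfl, hw⟩
    exact ⟨((k : Int), wss[k]), ⟨(PySem.List.mem_enumerate_iff _ _ _).mpr ⟨k, hk, by simp⟩,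
      by simpa [PySem.Set.contains] using hw⟩, rfl⟩

theorem nodup_bIndex (wss : List (PySem.Set String)) (hnd : ∀ ws ∈ wss, ws.Nodup)
    (w : String) : ((bIndex wss).getD w []).Nodup := by
  rw [bIndex_getD wss hnd w]
  have h1 : (((PySem.List.enumerate wss 0).filter (fun p => p.2.contains w))).Pairwise
      (fun p q => p.1 < q.1) :=
    List.Pairwise.sublist List.filter_sublist (PySem.List.pairwise_lt_enumerate wss 0)
  exact (List.pairwise_map.mpr (h1.imp fun h => by omega)).nodup
-- merged's count of j is the number of shared words between head set and wss[j]
theorem count_merged (wss : List (PySem.Set String)) (hnd : ∀ ws ∈ wss, ws.Nodup)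
    (wsi : List String) (i j : Int) (hij : i < j) (k : Nat) (hk : k < wss.length)
    (hjk : j = (k : Int)) :
    (wsi.flatMap (fun w => ((bIndex wss).getD w []).filter (fun j' => decide (i < j')))).count j
      = wsi.countP (fun w => wss[k].contains w) := by
  rw [List.count_flatMap]
  rw [PySem.List.sum_map_ite_one_zero_nat (fun w => wss[k].contains w) wsi |>.symm] at *
  · congr 1
    apply List.map_congr_left
    intro w hw
    have hnodup : (((bIndex wss).getD w []).filter (fun j' => decide (i < j'))).Nodup :=
      (nodup_bIndex wss hnd w).filter _
    rw [Function.comp_apply, List.Nodup.count hnodup]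
    by_cases hmem : w ∈ wss[k]
    · rw [if_pos (List.mem_filter.mpr
        ⟨(mem_bIndex wss hnd w j).mpr ⟨k, hk, hjk, hmem⟩, by simpa using hij⟩),
        if_pos (by simpa [PySem.Set.contains] using hmem)]
    · have hnotin : j ∉ List.filter (fun j' => decide (i < j')) ((bIndex wss).getD w []) := by
        rw [List.mem_filter]
        rintro ⟨hj, -⟩
        obtain ⟨k', hk', hjk', hw'⟩ := (mem_bIndex wss hnd w j).mp hj
        have : k' = k := by omega
        exact hmem (this ▸ hw')
      rw [if_neg hnotin, if_neg (by simpa [PySem.Set.contains] using hmem)]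

-- membership in merged forces a valid index beyond i
theorem mem_merged (wss : List (PySem.Set String)) (hnd : ∀ ws ∈ wss, ws.Nodup)
    (wsi : List String) (i j : Int)
    (hj : j ∈ wsi.flatMap (fun w => ((bIndex wss).getD w []).filter (fun j' => decide (i < j')))) :
    i < j ∧ ∃ (k : Nat) (_ : k < wss.length), j = (k : Int) := by
  simp only [List.mem_flatMap, List.mem_filter] at hj
  obtain ⟨w, -, hj, hlt⟩ := hj
  obtain ⟨k, hk, hjk, -⟩ := (mem_bIndex wss hnd w j).mp hj
  exact ⟨by simpa using hlt, k, hk, hjk⟩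
-- B's candidate list is exactly the ordered range filtered by the overlap-count test
theorem bCands_eq (m : Int) (wss : List (PySem.Set String)) (hnd : ∀ ws ∈ wss, ws.Nodup)
    (wsi : PySem.Set String) (i : Int) (hi : 0 ≤ i) :
    bCands m (bIndex wss) wsi i (wss.length : Int)
      = (PySem.List.pyRange (i + 1) (wss.length : Int)).filter
          (fun j => decide (m ≤ ((wsi.countP
              (fun w => (wss.getD j.toNat PySem.Set.empty).contains w) : Nat) : Int))) := by
  by_cases hm : m ≤ 0
  · rw [bCands, if_pos hm, (List.filter_eq_self).mpr]
    intro j _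
    simp only [decide_eq_true_eq]
    exact le_trans hm (by positivity)
  · rw [bCands, if_neg hm]
    show PySem.List.sorted (((PySem.Dict.counter
        (wsi.flatMap (fun w => ((bIndex wss).getD w []).filter (fun j => decide (i < j))))).items.filter
        (fun q => decide (m ≤ q.2))).map (·.1)) (fun x => x) = _
    set merged := wsi.flatMap (fun w => ((bIndex wss).getD w []).filter (fun j => decide (i < j))) with hmerged
    have hitems : (((PySem.Dict.counter merged).items.filter (fun q => decide (m ≤ q.2))).map (·.1))
        = (PySem.Set.ofList merged).filter (fun j => decide (m ≤ (merged.count j : Int))) := by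
      rw [PySem.Dict.items_counter, List.filter_map, List.map_map]
      simp [Function.comp_def]
    rw [hitems]
    apply PySem.List.sorted_eq_of_perm_of_pairwise_lt
    · have hys : ((PySem.List.pyRange (i + 1) (wss.length : Int)).filter
          (fun j => decide (m ≤ ((wsi.countP
            (fun w => (wss.getD j.toNat PySem.Set.empty).contains w) : Nat) : Int)))).Nodup :=
        (List.Pairwise.sublist List.filter_sublist
          (PySem.List.pairwise_lt_pyRange_one _ _)).imp ne_of_lt
      rw [List.perm_ext_iff_of_nodup hys ((PySem.Set.nodup_ofList merged).filter _)]
      intro j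
      simp only [List.mem_filter, PySem.Set.mem_ofList, PySem.List.mem_pyRange_one,
        decide_eq_true_eq]
      constructor
      · rintro ⟨⟨hj1, hj2⟩, hcnt⟩
        have hk : j.toNat < wss.length := by omega
        have hjk : j = (j.toNat : Int) := by omega
        have hcount := count_merged wss hnd wsi i j (by omega) j.toNat hk hjk
        rw [List.getD_eq_getElem _ _ hk] at hcnt
        refine ⟨?_, by rw [hcount]; exact hcnt⟩
        -- m ≥ 1 forces at least one shared word, hence membership in merged
        have hpos : 0 < wsi.countP (fun w => wss[j.toNat].contains w) := by omega
        obtain ⟨w, hw, hwk⟩ := List.countP_pos_iff.mp hpos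
        rw [hmerged]
        refine List.mem_flatMap.mpr ⟨w, hw, List.mem_filter.mpr ⟨?_, by simpa using hj1⟩⟩
        exact (mem_bIndex wss hnd w j).mpr ⟨j.toNat, hk, hjk, by simpa [PySem.Set.contains] using hwk⟩
      · rintro ⟨hj, hcnt⟩
        obtain ⟨hij, k, hk, hjk⟩ := mem_merged wss hnd wsi i j hj
        have hcount := count_merged wss hnd wsi i j hij k hk hjk
        have : j.toNat = k := by omega
        rw [List.getD_eq_getElem _ _ (by omega : j.toNat < wss.length)]
        refine ⟨⟨by omega, by omega⟩, ?_⟩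
        rw [hcount] at hcnt
        simpa [this] using hcnt
    · exact List.Pairwise.sublist List.filter_sublist (PySem.List.pairwise_lt_pyRange_one _ _)
-- a fold over range(k, len(songs)) is a fold over the suffix songs[k:]
theorem foldl_pyRange_drop {α β : Type} (songs : List α) (G : β → Int → β) (G' : β → α → β)
    (hG : ∀ (k : Nat) (h : k < songs.length) (st : β), G st (k : Int) = G' st songs[k]) :
    ∀ (l : List α) (k : Nat), songs.drop k = l → ∀ st : β,
      (PySem.List.pyRange (k : Int) (songs.length : Int)).foldl G st = l.foldl G' st := by
  intro l
  induction l with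
  | nil =>
    intro k hk st
    rw [PySem.List.pyRange_one_eq_nil (by
      have := List.drop_eq_nil_iff.mp hk
      omega)]
    rfl
  | cons s rest ih =>
    intro k hk st
    have hklt : k < songs.length := by
      by_contra h
      rw [List.drop_eq_nil_iff.mpr (by omega)] at hk
      exact (List.cons_ne_nil s rest) hk.symm
    have hgs : songs[k] = s := by
      have h1 : (songs.drop k).head? = some s := by rw [hk]; rfl
      rw [List.head?_drop] at h1
      simpa [List.getElem?_eq_getElem hklt] using h1
    have hrest : songs.drop (k + 1) = rest := by
      have := congrArg (List.drop 1) hk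
      simpa [List.drop_drop, Nat.add_comm] using this
    rw [PySem.List.pyRange_one_cons (by exact_mod_cast hklt), List.foldl_cons,
      hG k hklt st, hgs, List.foldl_cons]
    have : ((k : Int) + 1) = ((k + 1 : Nat) : Int) := by push_cast; ring
    rw [this, ih (k + 1) hrest]
-- one head's collection round: A's suffix scan = B's indexed-candidates loop
theorem inner_eq (m : Int) (bl : List (String × Bool)) (songs : List (String × String × String))
    (wsi : PySem.Set String) (k : Nat)
    (st : List (String × String × String) × PySem.Set String) :
    bCollect songs
        (bCands m (bIndex (songs.map (fun s => wordSet bl s.1))) wsi (k : Int) (songs.length : Int)) st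
      = innerA m bl wsi (songs.drop (k + 1)) st := by
  set wss := songs.map (fun s => wordSet bl s.1) with hwss
  have hnd : ∀ ws ∈ wss, ws.Nodup := by
    intro ws hws
    obtain ⟨s, -, rfl⟩ := List.mem_map.mp hws
    exact PySem.Set.nodup_ofList _
  have hlen : ((songs.length : Int)) = ((wss.length : Int)) := by rw [hwss, List.length_map]
  rw [hlen, bCands_eq m wss hnd wsi (k : Int) (by positivity), bCollect,
    ← PySem.List.foldl_if_eq_foldl_filter]
  rw [show ((k : Int) + 1) = (((k + 1 : Nat)) : Int) by push_cast; ring, ← hlen]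
  rw [foldl_pyRange_drop songs _
    (fun st s => if hasOverlap m wsi (wordSet bl s.1) then
        (if !PySem.Set.contains st.2 s.2.1 then (st.1 ++ [s], PySem.Set.add st.2 s.2.1) else st)
      else st) ?_ (songs.drop (k + 1)) (k + 1) rfl st]
  · rw [innerA]
    apply PySem.List.foldl_congr_mem
    intro acc sj _
    by_cases hc : PySem.Set.contains acc.2 sj.2.1 <;>
      by_cases ho : hasOverlap m wsi (wordSet bl sj.1) <;>
        simp [ho]
  · intro k' hk' st'
    have htn : ((k' : Int)).toNat = k' := by simp
    have hfetch : (PySem.List.pyGet? songs ((k' : Nat) : Int)).getD ("", "", "") = songs[k'] := by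
      rw [PySem.List.pyGet?_natCast, List.getElem?_eq_getElem hk']
      rfl
    have hq : (decide (m ≤ ((wsi.countP
          (fun w => (wss.getD ((k' : Int)).toNat PySem.Set.empty).contains w) : Nat) : Int)))
        = hasOverlap m wsi (wordSet bl songs[k'].1) := by
      have hgd : wss.getD ((k' : Int)).toNat PySem.Set.empty = wordSet bl songs[k'].1 := by
        rw [htn, List.getD_eq_getElem _ _ (by simpa [hwss] using hk')]
        simp [hwss]
      rw [hgd, hasOverlap]
      congr 1
      rw [PySem.Set.inter, ← List.countP_eq_length_filter]
    simp only [hq, hfetch]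
-- MAIN INVARIANT: B's enumerate fold over the suffix at k equals A's outer recursion there
theorem outer_eq (m : Int) (bl : List (String × Bool)) (songs : List (String × String × String)) :
    ∀ (l : List (String × String × String)) (k : Nat), songs.drop k = l →
      ∀ (seen : PySem.Set String) (gs : List (List (String × String × String))),
      ((PySem.List.enumerate (l.zip (l.map (fun s => wordSet bl s.1))) (k : Int)).foldl
        (bStep m songs (bIndex (songs.map (fun s => wordSet bl s.1)))) (gs, seen)).1
      = auxA m bl l seen gs := by
  intro l
  induction l with
  | nil =>
    intro k hk seen gs
    rw [auxA]
    rfl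
  | cons s rest ih =>
    intro k hk seen gs
    have hrest : songs.drop (k + 1) = rest := by
      have := congrArg (List.drop 1) hk
      simpa [List.drop_drop, Nat.add_comm] using this
    rw [List.map_cons, List.zip_cons_cons, PySem.List.enumerate_cons, List.foldl_cons, auxA]
    by_cases hc : PySem.Set.contains seen s.2.1
    · rw [show bStep m songs (bIndex (songs.map (fun s => wordSet bl s.1))) (gs, seen)
          ((k : Int), (s, wordSet bl s.1)) = (gs, seen) by rw [bStep, if_pos hc]]
      rw [if_pos hc,
        show ((k : Int) + 1) = (((k + 1 : Nat)) : Int) by push_cast; ring,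
        ih (k + 1) hrest seen gs]
    · rw [bStep, if_neg hc, if_neg hc,
        inner_eq m bl songs (wordSet bl s.1) k _, bPush,
        show ((k : Int) + 1) = (((k + 1 : Nat)) : Int) by push_cast; ring,
        ih (k + 1) hrest _ _, hrest]

-- ===== VERDICT (by name: the statement is the Claim_ definition above) =====
theorem find_similar_groups_by_words_spec : Claim_equal_find_similar_groups_by_words := by
  intro songs m bl _
  show find_similar_groups_by_words songs m bl = find_similar_groups_by_words_alt songs m bl
  rw [find_similar_groups_by_words, find_similar_groups_by_words_alt]
  exact (outer_eq m bl songs songs 0 (by simp) PySem.Set.empty []).symm
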